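-- pv_equiv track=rewrite | github.com/Tkzito/Estudos | Desafio/fibonacci.py | verificar_sequencia_fibonacci
-- ===== SOURCE A (Python) =====
-- def encontrar_termos_mais_proximos(n):
--     """Encontra os dois termos da sequência de Fibonacci mais próximos de n."""
--     a, b = 0, 1
--     while b < n:
--         a, b = b, a + b
--     return a, b
--
-- def is_fibonacci(n):
--     """Verifica se um número pertence à sequência de Fibonacci."""
--     if n < 0:
--         raise ValueError("Número negativo não é permitido.")
--     a, b = 0, 1
--     while b < n:
--         a, b = b, a + b
--     return b == n or n == 0
--
-- def verificar_sequencia_fibonacci(numeros):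
--     """Verifica se os números em uma lista pertencem à sequência de Fibonacci."""
--     resultados = []
--     for numero in numeros:
--         if numero < 0:
--             resultado = f"O número {numero} é negativo. A sequência de Fibonacci contém apenas números naturais."
--         else:
--             if is_fibonacci(numero):
--                 resultado = f"O número {numero} pertence à sequência de Fibonacci."
--             else:
--                 a, b = encontrar_termos_mais_proximos(numero)
--                 resultado = f"O número {numero} não pertence à sequência de Fibonacci. Os termos mais próximos são {a} e {b}."
--         resultados.append(resultado)
--     return resultados
-- ===== SOURCE B (Python) =====
-- def verificar_sequencia_fibonacci(numeros):
--     """Verifica se os números em uma lista pertencem à sequência de Fibonacci.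
--
--     Uma única tabela de Fibonacci é construída até cobrir max(numeros);
--     cada número é então classificado por uma contagem na tabela."""
--     m = max(numeros, default=0)
--     fibs = [0, 1]
--     while fibs[-1] < m:
--         fibs.append(fibs[-1] + fibs[-2])
--     resultados = []
--     for numero in numeros:
--         if numero < 0:
--             resultados.append(f"O número {numero} é negativo. A sequência de Fibonacci contém apenas números naturais.")
--         else:
--             i = sum(1 for f in fibs if f < numero)
--             if fibs[i] == numero:
--                 resultados.append(f"O número {numero} pertence à sequência de Fibonacci.")
--             else:
--                 resultados.append(f"O número {numero} não pertence à sequência de Fibonacci. Os termos mais próximos são {fibs[i-1]} e {fibs[i]}.")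
--     return resultados
-- ===== Notes on version B (the rewrite author's own statement) =====
-- stated objective: alternative
-- what changed: A re-runs the Fibonacci climb from a=0, b=1 twice per number (once in is_fibonacci, once in encontrar_termos_mais_proximos); B builds one shared Fibonacci table up to max(numeros) and classifies each number by counting the table entries below it, reading membership and the two nearest terms off the table.
import Mathlib
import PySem

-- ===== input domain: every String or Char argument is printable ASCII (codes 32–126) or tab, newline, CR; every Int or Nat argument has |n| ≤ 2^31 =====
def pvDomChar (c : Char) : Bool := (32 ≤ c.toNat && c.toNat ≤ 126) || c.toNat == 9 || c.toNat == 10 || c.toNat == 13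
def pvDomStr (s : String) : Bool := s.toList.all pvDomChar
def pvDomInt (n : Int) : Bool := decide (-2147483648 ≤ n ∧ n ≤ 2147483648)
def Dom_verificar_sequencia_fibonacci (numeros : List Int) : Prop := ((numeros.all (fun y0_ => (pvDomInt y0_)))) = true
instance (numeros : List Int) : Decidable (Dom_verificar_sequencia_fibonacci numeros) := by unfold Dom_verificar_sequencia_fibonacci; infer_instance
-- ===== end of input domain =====

-- B replaces A's two per-number Fibonacci climbs by one shared Fibonacci table built
-- up to max(numeros), classifying each number by a count over that table (objective:
-- alternative decomposition; not claimed faster).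

-- ===== PORT A =====
-- The two Python while-loops (in is_fibonacci and encontrar_termos_mais_proximos) are
-- the identical climb `while b < n: a, b = b, a + b`; ported once.  The extra guard
-- conjuncts `1 ≤ b ∧ a ≤ b` only make the recursion well-founded: they hold at the
-- only entry state a=0, b=1 and are preserved by the step, so on every reachable state
-- this computes exactly what the Python loop computes there.
def fibClimb (n a b : Int) : Int × Int :=
  if _h : b < n ∧ 1 ≤ b ∧ a ≤ b then fibClimb n b (a + b) else (a, b)
termination_by (2 * n - a - b).toNat
decreasing_by omega

def encontrar_termos_mais_proximos (n : Int) : Int × Int := fibClimb n 0 1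

-- the `raise` for n < 0 never fires: A only calls is_fibonacci with numero ≥ 0
def is_fibonacci (n : Int) : Bool :=
  ((fibClimb n 0 1).2 == n) || (n == 0)

def verificar_sequencia_fibonacci (numeros : List Int) : List String :=
  numeros.map (fun numero =>
    if numero < 0 then
      "O número " ++ PySem.Int.toStr numero ++ " é negativo. A sequência de Fibonacci contém apenas números naturais."
    else if is_fibonacci numero then
      "O número " ++ PySem.Int.toStr numero ++ " pertence à sequência de Fibonacci."
    else
      let p := encontrar_termos_mais_proximos numero
      "O número " ++ PySem.Int.toStr numero ++ " não pertence à sequência de Fibonacci. Os termos mais próximos são " ++ PySem.Int.toStr p.1 ++ " e " ++ PySem.Int.toStr p.2 ++ ".")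

-- ===== PORT B =====
-- the Python `while fibs[-1] < m: fibs.append(...)` producing the table entries past
-- the initial [0, 1]; same well-foundedness guard as fibClimb (holds on every
-- reachable state; entry is a=0, b=1).
def buildFibs (m a b : Int) : List Int :=
  if _h : b < m ∧ 1 ≤ b ∧ a ≤ b then (a + b) :: buildFibs m b (a + b) else []
termination_by (2 * m - a - b).toNat
decreasing_by omega

def verificar_sequencia_fibonacci_alt (numeros : List Int) : List String :=
  -- max(numeros, default=0)
  let m := (PySem.List.max? numeros (fun x => x)).getD 0
  let fibs : List Int := 0 :: 1 :: buildFibs m 0 1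
  numeros.map (fun numero =>
    if numero < 0 then
      "O número " ++ PySem.Int.toStr numero ++ " é negativo. A sequência de Fibonacci contém apenas números naturais."
    else
      -- i = sum(1 for f in fibs if f < numero), i.e. the count of table entries < numero
      let i := fibs.countP (fun f => decide (f < numero))
      -- fibs[i] / fibs[i-1]: provably in range for every 0 ≤ numero ≤ m (getD is exact there)
      if fibs.getD i 0 == numero then
        "O número " ++ PySem.Int.toStr numero ++ " pertence à sequência de Fibonacci."
      else
        "O número " ++ PySem.Int.toStr numero ++ " não pertence à sequência de Fibonacci. Os termos mais próximos são " ++ PySem.Int.toStr (fibs.getD (i - 1) 0) ++ " e " ++ PySem.Int.toStr (fibs.getD i 0) ++ ".")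

-- ===== PRECONDITION & SPEC =====
def Spec_verificar_sequencia_fibonacci (numeros : List Int) (out : List String) : Prop := out = verificar_sequencia_fibonacci_alt numeros
instance (numeros : List Int) (out : List String) : Decidable (Spec_verificar_sequencia_fibonacci numeros out) := by unfold Spec_verificar_sequencia_fibonacci; infer_instance

-- ===== CLAIM (what is proved, stated in full; the proofs are below) =====
def Claim_equal_verificar_sequencia_fibonacci : Prop := ∀ (numeros : List Int), Dom_verificar_sequencia_fibonacci numeros → Spec_verificar_sequencia_fibonacci numeros (verificar_sequencia_fibonacci numeros)

-- ===== LEMMAS AND PROOFS =====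

theorem buildFibs_ge (m a b : Int) :
    0 ≤ a → ∀ x ∈ buildFibs m a b, b ≤ x := by
  fun_induction buildFibs m a b with
  | case1 a b h ih =>
    intro ha x hx
    rcases List.mem_cons.mp hx with hx | hx
    · omega
    · have := ih (by omega) x hx; omega
  | case2 a b h => intro _ x hx; simp at hx

theorem core (n m a b : Int) (hnm : n ≤ m) :
    0 ≤ a → a ≤ b → 1 ≤ b → a < n →
    1 ≤ (a :: b :: buildFibs m a b).countP (fun f => decide (f < n)) ∧
    (a :: b :: buildFibs m a b).getD
      ((a :: b :: buildFibs m a b).countP (fun f => decide (f < n))) 0 = (fibClimb n a b).2 ∧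
    (a :: b :: buildFibs m a b).getD
      ((a :: b :: buildFibs m a b).countP (fun f => decide (f < n)) - 1) 0 = (fibClimb n a b).1 := by
  fun_induction fibClimb n a b with
  | case1 a b h ih =>
    intro ha hab hb han
    have hstep : buildFibs m a b = (a + b) :: buildFibs m b (a + b) := by
      rw [buildFibs]; rw [dif_pos ⟨by omega, by omega, by omega⟩]
    obtain ⟨ih1, ih2, ih3⟩ := ih (by omega) (by omega) (by omega) (by omega)
    rw [hstep]
    have hc : (a :: b :: (a + b) :: buildFibs m b (a + b)).countP (fun f => decide (f < n))
        = (b :: (a + b) :: buildFibs m b (a + b)).countP (fun f => decide (f < n)) + 1 :=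
      List.countP_cons_of_pos (pa := decide_eq_true han)
    rw [hc]
    obtain ⟨k, hk⟩ : ∃ k, (b :: (a + b) :: buildFibs m b (a + b)).countP (fun f => decide (f < n)) = k + 1 :=
      ⟨_, (Nat.succ_pred_eq_of_pos ih1).symm⟩
    refine ⟨by omega, ?_, ?_⟩
    · rw [List.getD_cons_succ]; exact ih2
    · rw [Nat.add_sub_cancel, hk, List.getD_cons_succ]
      rw [hk] at ih3
      simpa using ih3
  | case2 a b h =>
    intro ha hab hb han
    have hz : (buildFibs m a b).countP (fun f => decide (f < n)) = 0 := by
      rw [List.countP_eq_zero]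
      intro x hx
      have := buildFibs_ge m a b ha x hx
      simp; omega
    have hc : (a :: b :: buildFibs m a b).countP (fun f => decide (f < n)) = 1 := by
      rw [List.countP_cons_of_pos (p := fun f => decide (f < n)) (pa := by simpa using han),
         List.countP_cons_of_neg, hz]
      simp; omega
    rw [hc]
    exact ⟨le_refl 1, rfl, rfl⟩

-- every element of the list is bounded by max(numeros, default=0)
theorem le_maxD (numeros : List Int) : ∀ x ∈ numeros, x ≤ (PySem.List.max? numeros (fun y => y)).getD 0 := by
  intro x hx
  cases hmax : PySem.List.max? numeros (fun y => y) with
  | none =>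
    rw [PySem.List.max?_eq_none_iff] at hmax
    subst hmax; simp at hx
  | some v =>
    have := PySem.List.max?_isMax hmax x hx
    simpa using this

theorem fibClimb_zero : fibClimb 0 0 1 = (0, 1) := by
  rw [fibClimb, dif_neg (by omega)]

-- ===== VERDICT (by name: the statement is the Claim_ definition above) =====
theorem verificar_sequencia_fibonacci_spec : Claim_equal_verificar_sequencia_fibonacci := by
  intro numeros _
  unfold Spec_verificar_sequencia_fibonacci
  simp only [verificar_sequencia_fibonacci, verificar_sequencia_fibonacci_alt]
  apply List.map_congr_left
  intro numero hmem
  by_cases hneg : numero < 0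
  · simp only [if_pos hneg]
  simp only [if_neg hneg]
  by_cases h0 : numero = 0
  · subst h0
    have hz : (0 :: 1 :: buildFibs ((PySem.List.max? numeros (fun x => x)).getD 0) 0 1).countP
        (fun f => decide (f < (0 : Int))) = 0 := by
      rw [List.countP_eq_zero]
      intro x hx
      rcases List.mem_cons.mp hx with rfl | hx
      · simp
      rcases List.mem_cons.mp hx with rfl | hx
      · simp
      have := buildFibs_ge _ 0 1 (by omega) x hx
      simp; omega
    rw [hz]
    simp [is_fibonacci, fibClimb_zero]
  · obtain ⟨h1, h2, h3⟩ :=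
      core numero ((PySem.List.max? numeros (fun x => x)).getD 0) 0 1
        (le_maxD numeros numero hmem) (le_refl 0) (by omega) (by omega) (by omega)
    rw [h2]
    unfold is_fibonacci encontrar_termos_mais_proximos
    have hz0 : (numero == (0 : Int)) = false := by simpa using h0
    rw [hz0, Bool.or_false]
    by_cases hf : ((fibClimb numero 0 1).2 == numero) = true
    · rw [if_pos hf, if_pos hf]
    · rw [if_neg hf, if_neg hf, h3]
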